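-- pv_equiv track=rewrite | github.com/anhhominh/python_3.11.3 | square_every_digit.py | square_digits
-- ===== SOURCE A (Python) =====
-- def square_digits(num):
--     if num < 10:
--         return num**2
--     else:
--         nums = []
--         while num>0:
--             d = num % 10
--             nums.append(d)
--             num = num // 10
--         number = []
--         for i in nums:
--             number.append(i**2)
--         number.reverse()
--         list_of_strings = [str(item) for item in number]
--         return int(''.join(list_of_strings))
-- ===== SOURCE B (Python) =====
-- def square_digits(num):
--     if num < 10:
--         return num**2
--     return int(''.join(str(int(d)**2) for d in str(num)))
-- ===== Notes on version B (the rewrite author's own statement) =====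
-- stated objective: idiomatic
-- what changed: Replaces the modulo-extraction loop, squaring loop, reverse and list-of-strings join with a single most-significant-first pass over the characters of str(num).
import Mathlib
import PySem

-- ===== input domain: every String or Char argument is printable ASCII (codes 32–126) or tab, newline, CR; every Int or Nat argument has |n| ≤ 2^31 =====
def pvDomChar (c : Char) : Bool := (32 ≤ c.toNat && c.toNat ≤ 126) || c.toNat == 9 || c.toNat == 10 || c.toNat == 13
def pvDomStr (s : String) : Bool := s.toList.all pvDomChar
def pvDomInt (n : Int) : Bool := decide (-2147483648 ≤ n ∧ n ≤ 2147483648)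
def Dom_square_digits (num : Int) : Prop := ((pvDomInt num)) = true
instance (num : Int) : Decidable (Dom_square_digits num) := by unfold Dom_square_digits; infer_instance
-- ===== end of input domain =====

-- B squares each digit by one most-significant-first pass over str(num) instead of A's
-- modulo loop + squaring loop + reverse + join; same values everywhere (idiomatic rewrite).

-- ===== PORT A =====
-- the 'while num > 0' digit-extraction loop of A (appends num % 10, then num //= 10)
def squareLoopA (num : Int) (nums : List Int) : List Int :=
  if _h : num > 0 then
    squareLoopA (PySem.Int.floordiv num 10) (nums ++ [PySem.Int.mod num 10])
  else nums
termination_by num.toNat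
decreasing_by
  have h10 : (0:Int) < 10 := by norm_num
  rw [PySem.Int.floordiv_eq_ediv_of_pos h10]
  omega

def square_digits (num : Int) : Int :=
  if num < 10 then num ^ 2
  else
    let nums := squareLoopA num []
    let number := nums.map (fun i => i ^ 2)
    let number := number.reverse
    let list_of_strings := number.map (fun item => PySem.Int.toStr item)
    -- int(...) on the joined digit string; it never raises here (nonempty digit string)
    (PySem.Int.ofStr? (PySem.Str.join "" list_of_strings)).getD 0

-- ===== PORT B =====
def square_digits_alt (num : Int) : Int :=
  if num < 10 then num ^ 2
  else
    let parts := (PySem.Int.toStr num).toList.map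
      (fun d => PySem.Int.toStr (((PySem.Int.ofStr? (String.ofList [d])).getD 0) ^ 2))
    (PySem.Int.ofStr? (PySem.Str.join "" parts)).getD 0

-- ===== PRECONDITION & SPEC =====
def Spec_square_digits (num : Int) (out : Int) : Prop := out = square_digits_alt num
instance (num : Int) (out : Int) : Decidable (Spec_square_digits num out) := by unfold Spec_square_digits; infer_instance

-- ===== CLAIM (what is proved, stated in full; the proofs are below) =====
def Claim_equal_square_digits : Prop := ∀ (num : Int), Dom_square_digits num → Spec_square_digits num (square_digits num)

-- ===== LEMMAS AND PROOFS =====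

-- most-significant-first decimal digits of n (as naturals)
def msbN (n : Nat) : List Nat :=
  if n < 10 then [n] else msbN (n / 10) ++ [n % 10]
termination_by n
decreasing_by exact Nat.div_lt_self (by omega) (by omega)

lemma msbN_lt (n : Nat) : ∀ d ∈ msbN n, d < 10 := by
  induction n using Nat.strong_induction_on with
  | _ n ih =>
    rw [msbN]
    split
    · simpa using ‹n < 10›
    · intro d hd
      rcases List.mem_append.1 hd with h | h
      · exact ih (n / 10) (Nat.div_lt_self (by omega) (by omega)) d h
      · simp at h; omega

lemma toDigitsCore_eq (fuel n : Nat) (ds : List Char) (h : n < fuel) :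
    Nat.toDigitsCore 10 fuel n ds = (msbN n).map Nat.digitChar ++ ds := by
  induction fuel generalizing n ds with
  | zero => omega
  | succ f ih =>
    rw [Nat.toDigitsCore, msbN]
    by_cases h10 : n < 10
    · have : n / 10 = 0 := by omega
      simp [this, h10, Nat.mod_eq_of_lt h10]
    · have hlt : n / 10 < f := by
        have := Nat.div_lt_self (show 0 < n by omega) (show 1 < 10 by omega)
        omega
      have hne : n / 10 ≠ 0 := by
        intro h0; have := Nat.lt_of_div_eq_zero (by omega) h0; omega
      simp only [hne, h10, ih (n / 10) _ hlt]
      simp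

lemma squareLoopA_eq (n : Nat) (hn : 0 < n) (acc : List Int) :
    squareLoopA (n : Int) acc = acc ++ ((msbN n).map (Nat.cast : Nat → Int)).reverse := by
  induction n using Nat.strong_induction_on generalizing acc with
  | _ n ih =>
    have hfd : PySem.Int.floordiv (n : Int) 10 = ((n / 10 : Nat) : Int) := by
      exact_mod_cast PySem.Int.floordiv_natCast n 10
    have hmd : PySem.Int.mod (n : Int) 10 = ((n % 10 : Nat) : Int) := by
      exact_mod_cast PySem.Int.mod_natCast n 10
    rw [squareLoopA, dif_pos (by exact_mod_cast hn), hfd, hmd, msbN]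
    by_cases h10 : n < 10
    · have h0 : n / 10 = 0 := by omega
      rw [h0]
      simp [squareLoopA, h10, Nat.mod_eq_of_lt h10]
    · have hlt : n / 10 < n := Nat.div_lt_self (by omega) (by omega)
      rw [ih (n / 10) hlt (by omega)]
      simp [h10]

lemma charVal_digitChar (d : Nat) (hd : d < 10) :
    (PySem.Int.ofChars? [Nat.digitChar d]).getD 0 = (d : Int) := by
  interval_cases d <;> decide

theorem square_digits_spec : Claim_equal_square_digits := by
  intro num _
  unfold Spec_square_digits square_digits square_digits_alt
  by_cases hlt : num < 10
  · simp [hlt]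
  · obtain ⟨n, rfl⟩ : ∃ n : Nat, num = (n : Int) := ⟨num.toNat, by omega⟩
    have hA := squareLoopA_eq n (by omega) []
    have hB : (PySem.Int.toStr (n : Int)).toList = (msbN n).map Nat.digitChar := by
      rw [PySem.Int.toList_toStr]
      unfold PySem.Int.toChars
      rw [if_neg (by omega), Int.toNat_natCast]
      unfold Nat.toDigits
      rw [toDigitsCore_eq (n + 1) n [] (by omega)]
      simp
    have key : ((((msbN n).map (Nat.cast : Nat → Int)).reverse.map (fun i => i ^ 2)).reverse).map
          (fun item => PySem.Int.toStr item)
        = ((msbN n).map Nat.digitChar).map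
          (fun d => PySem.Int.toStr (((PySem.Int.ofStr? (String.ofList [d])).getD 0) ^ 2)) := by
      simp only [List.map_reverse, List.reverse_reverse, List.map_map]
      refine List.map_congr_left ?_
      intro d hd
      simp [charVal_digitChar d (msbN_lt n d hd)]
    simp only [if_neg hlt, hA, hB, List.nil_append, key]
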